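-- pv_equiv track=rewrite | github.com/strogera/AoC2020 | Day 7/d7.py | findAllNestedBagsContainingBag
-- ===== SOURCE A (Python) =====
-- def findBagsContainingBag(bagGraph, bagToFind):
--     l=[]
--     for bag, _ in list(bagGraph.items()):
--         if bagToFind in bagGraph[bag]:
--             l.append(bag)
--     return l
--
-- def findAllNestedBagsContainingBag(bagGraph, bag):
--     containsBagToFind=set()
--     bagsToCheck=findBagsContainingBag(bagGraph, bag)
--     while(len(bagsToCheck)!=0):
--         l=[]
--         for cbag in bagsToCheck:
--             if cbag not in containsBagToFind:
--                 containsBagToFind.add(cbag)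
--                 l+=findBagsContainingBag(bagGraph, cbag)
--         bagsToCheck=l
--     return containsBagToFind
-- ===== SOURCE B (Python) =====
-- def findAllNestedBagsContainingBag(bagGraph, bag):
--     # one pass: reverse containment adjacency (inner bag -> containers, in key order)
--     rev = {}
--     for container, contents in bagGraph.items():
--         for inner in dict.fromkeys(contents):
--             rev.setdefault(inner, []).append(container)
--     # single BFS over the reverse edges with a growing worklist
--     seen = set()
--     queue = list(rev.get(bag, ()))
--     i = 0
--     while i < len(queue):
--         c = queue[i]
--         i += 1
--         if c not in seen:
--             seen.add(c)
--             queue.extend(rev.get(c, ()))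
--     return seen
-- ===== Notes on version B (the rewrite author's own statement) =====
-- stated objective: alternative
-- what changed: A rescans the entire graph once per reachable bag (findBagsContainingBag called inside the worklist loop); B instead builds the reverse containment adjacency in one pass and then runs a single queue-based BFS over it, touching each edge once.
import Mathlib
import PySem

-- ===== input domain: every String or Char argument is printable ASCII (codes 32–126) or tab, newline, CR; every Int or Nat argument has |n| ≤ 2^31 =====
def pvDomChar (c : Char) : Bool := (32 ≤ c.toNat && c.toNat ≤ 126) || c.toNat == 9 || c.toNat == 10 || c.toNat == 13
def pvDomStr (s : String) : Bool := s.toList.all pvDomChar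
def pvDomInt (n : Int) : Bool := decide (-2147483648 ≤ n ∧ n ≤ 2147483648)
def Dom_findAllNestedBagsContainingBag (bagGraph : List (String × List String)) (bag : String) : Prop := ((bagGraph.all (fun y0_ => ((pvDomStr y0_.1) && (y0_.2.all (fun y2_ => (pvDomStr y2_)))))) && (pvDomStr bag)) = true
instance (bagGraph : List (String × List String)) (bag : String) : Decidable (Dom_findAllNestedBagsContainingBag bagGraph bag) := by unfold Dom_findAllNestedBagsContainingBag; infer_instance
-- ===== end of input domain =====

-- B replaces A's per-level whole-graph rescans with a reverse containment adjacency built once plus a single queue BFS over it (objective: alternative).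


-- ===== PORT A =====
-- (the termination lemmas between the definitions are cited by the ports' decreasing_by blocks)
def pvFindBags (d : PySem.Dict String (List String)) (bagToFind : String) : List String :=
  d.items.foldl (fun l p => if bagToFind ∈ d.getD p.1 [] then l ++ [p.1] else l) []
def pvStepA (d : PySem.Dict String (List String)) (st : PySem.Set String × List String) (cbag : String) : PySem.Set String × List String :=
  if PySem.Set.contains st.1 cbag then st
  else (PySem.Set.add st.1 cbag, st.2 ++ pvFindBags d cbag)

theorem pvFoldA_seen (d : PySem.Dict String (List String)) (tc : List String) (seen : PySem.Set String) (l : List String) :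
    (tc.foldl (pvStepA d) (seen, l)).1 = PySem.Set.update seen tc := by
  induction tc generalizing seen l with
  | nil => simp [PySem.Set.update]
  | cons c rest ih =>
    simp only [List.foldl_cons, PySem.Set.update, pvStepA]
    by_cases h : PySem.Set.contains seen c = true
    · simp only [h, if_pos]
      have hc : c ∈ seen := by simpa [PySem.Set.contains] using h
      have : PySem.Set.add seen c = seen := by simp [PySem.Set.add, PySem.Set.contains, hc]
      rw [ih, this]; rfl
    · simp only [h, if_neg, Bool.not_eq_true]
      rw [ih]; rfl

theorem pvFoldA_acc (d : PySem.Dict String (List String)) (tc : List String) (seen : PySem.Set String) (l : List String) :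
    (tc.foldl (pvStepA d) (seen, l)).2 = l ++ (tc.foldl (pvStepA d) (seen, [])).2 := by
  induction tc generalizing seen l with
  | nil => simp
  | cons c rest ih =>
    simp only [List.foldl_cons, pvStepA]
    by_cases h : PySem.Set.contains seen c = true
    · simp only [h, if_pos]; exact ih seen l
    · simp only [h, if_neg, Bool.not_eq_true]
      rw [ih _ (l ++ pvFindBags d c), ih _ ([] ++ pvFindBags d c)]
      simp

theorem pvFindBags_eq (d : PySem.Dict String (List String)) (c : String) :
    pvFindBags d c = (d.items.filter (fun p => decide (c ∈ d.getD p.1 []))).map (·.1) := by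
  unfold pvFindBags
  have h := PySem.List.foldl_append_ite (p := fun (q : String × List String) => c ∈ d.getD q.1 [])
    (f := fun q : String × List String => q.1) (l := d.items) (acc := [])
  simpa using h

theorem pvFindBags_mem (d : PySem.Dict String (List String)) (c x : String) (hx : x ∈ pvFindBags d c) :
    x ∈ d.items.map (·.1) := by
  rw [pvFindBags_eq] at hx
  simp only [List.mem_map] at hx
  obtain ⟨p, hp, rfl⟩ := hx
  exact List.mem_map_of_mem (List.mem_of_mem_filter hp)

theorem pvFoldA_l_mem (d : PySem.Dict String (List String)) (tc : List String) (seen : PySem.Set String) (x : String)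
    (hx : x ∈ (tc.foldl (pvStepA d) (seen, [])).2) : x ∈ d.items.map (·.1) := by
  induction tc generalizing seen with
  | nil => simp at hx
  | cons c rest ih =>
    simp only [List.foldl_cons, pvStepA] at hx
    by_cases h : PySem.Set.contains seen c = true
    · simp only [h, if_pos] at hx; exact ih _ hx
    · simp only [h, if_neg, Bool.not_eq_true] at hx
      rw [pvFoldA_acc] at hx
      rcases List.mem_append.1 hx with h1 | h1
      · simp only [List.nil_append] at h1; exact pvFindBags_mem d c x h1
      · exact ih _ h1

theorem pvFoldA_id (d : PySem.Dict String (List String)) (tc : List String) (seen : PySem.Set String)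
    (h : ∀ c ∈ tc, PySem.Set.contains seen c = true) :
    tc.foldl (pvStepA d) (seen, ([] : List String)) = (seen, []) := by
  induction tc with
  | nil => rfl
  | cons c rest ih =>
    simp only [List.foldl_cons, pvStepA, h c (by simp), if_pos]
    exact ih (fun c' hc' => h c' (by simp [hc']))

theorem pvSeen_sub_update (seen : PySem.Set String) (tc : List String) (x : String) (hx : x ∈ seen) :
    x ∈ PySem.Set.update seen tc := by
  induction tc generalizing seen with
  | nil => simpa [PySem.Set.update] using hx
  | cons c rest ih =>
    simp only [PySem.Set.update, List.foldl_cons] at *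
    exact ih _ (by rw [PySem.Set.mem_add]; left; exact hx)

theorem pvMem_update (seen : PySem.Set String) (tc : List String) (x : String) (hx : x ∈ tc) :
    x ∈ PySem.Set.update seen tc := by
  induction tc generalizing seen with
  | nil => simp at hx
  | cons c rest ih =>
    simp only [List.mem_cons] at hx
    simp only [PySem.Set.update, List.foldl_cons]
    rcases hx with rfl | hx
    · exact pvSeen_sub_update _ rest x (by rw [PySem.Set.mem_add]; right; rfl)
    · exact ih _ hx

theorem pvGetD_mem_vals (rev : PySem.Dict String (List String)) (c x : String) (hx : x ∈ rev.getD c []) :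
    x ∈ rev.values.flatten := by
  rw [PySem.Dict.getD_eq_get?_getD] at hx
  cases hg : rev.get? c with
  | none => rw [hg] at hx; simp at hx
  | some v =>
    rw [hg] at hx; simp only [Option.getD_some] at hx
    have hm := PySem.Dict.mem_items_of_get?_eq_some rev hg
    have : v ∈ rev.values := by
      simp only [PySem.Dict.values]
      exact List.mem_map_of_mem hm
    exact List.mem_flatten.2 ⟨v, this, hx⟩


theorem pvContains_iff (s : PySem.Set String) (x : String) : PySem.Set.contains s x = true ↔ x ∈ s := by
  simp [PySem.Set.contains]

def pvKeysF (d : PySem.Dict String (List String)) : Finset String := (d.items.map (·.1)).toFinset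

def pvLoopA (d : PySem.Dict String (List String)) (seen : PySem.Set String) (toCheck : List String) : List String :=
  if h : toCheck = [] then seen
  else
    let r := toCheck.foldl (pvStepA d) (seen, [])
    pvLoopA d r.1 r.2
termination_by ((((pvKeysF d ∪ toCheck.toFinset) \ seen.toFinset).card, toCheck.length) : Nat × Nat)
decreasing_by
  simp only [List.foldl_attach]
  rw [Prod.lex_def]
  dsimp only
  by_cases hall : ∀ c ∈ toCheck, PySem.Set.contains seen c = true
  · rw [pvFoldA_id d toCheck seen hall]
    have hsub : (pvKeysF d ∪ (([] : List String)).toFinset) \ seen.toFinset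
        ⊆ (pvKeysF d ∪ toCheck.toFinset) \ seen.toFinset := by
      intro x hx
      simp only [Finset.mem_sdiff, Finset.mem_union] at hx ⊢
      exact ⟨Or.inl (hx.1.resolve_right (by simp)), hx.2⟩
    rcases lt_or_eq_of_le (Finset.card_le_card hsub) with hlt | heq
    · left; exact hlt
    · right; exact ⟨heq, by simpa [List.length_pos_iff] using h⟩
  · simp only [not_forall, exists_prop] at hall
    obtain ⟨c0, hc0, hc0n⟩ := hall
    left
    apply Finset.card_lt_card
    have hseen := pvFoldA_seen d toCheck seen []
    have hsub : (pvKeysF d ∪ (toCheck.foldl (pvStepA d) (seen, [])).2.toFinset)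
          \ (toCheck.foldl (pvStepA d) (seen, [])).1.toFinset
        ⊆ (pvKeysF d ∪ toCheck.toFinset) \ seen.toFinset := by
      intro x hx
      simp only [Finset.mem_sdiff, Finset.mem_union, List.mem_toFinset] at hx ⊢
      refine ⟨?_, fun hxs => hx.2 ?_⟩
      · rcases hx.1 with hk | hl
        · exact Or.inl hk
        · exact Or.inl (by simpa [pvKeysF, List.mem_toFinset] using pvFoldA_l_mem d toCheck seen x hl)
      · rw [hseen]; exact pvSeen_sub_update seen toCheck x hxs
    refine (Finset.ssubset_iff_of_subset hsub).2 ⟨c0, ?_, ?_⟩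
    · simp only [Finset.mem_sdiff, Finset.mem_union, List.mem_toFinset]
      exact ⟨Or.inr hc0, fun hmem => hc0n ((pvContains_iff seen c0).2 hmem)⟩
    · simp only [Finset.mem_sdiff, List.mem_toFinset, not_and, not_not]
      intro _
      rw [hseen]
      exact pvMem_update seen toCheck c0 hc0


def findAllNestedBagsContainingBag (bagGraph : List (String × List String)) (bag : String) : List String :=
  let d := PySem.Dict.ofList bagGraph
  pvLoopA d PySem.Set.empty (pvFindBags d bag)

-- ===== PORT B =====
def pvRev (d : PySem.Dict String (List String)) : PySem.Dict String (List String) :=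
  d.items.foldl
    (fun rev p => (PySem.List.dedup p.2).foldl (fun r inner => r.modify inner [] (· ++ [p.1])) rev)
    PySem.Dict.empty

def pvValsF (rev : PySem.Dict String (List String)) : Finset String := rev.values.flatten.toFinset

def pvLoopB (rev : PySem.Dict String (List String)) (seen : PySem.Set String) (pending : List String) : List String :=
  match pending with
  | [] => seen
  | c :: rest =>
    if PySem.Set.contains seen c then pvLoopB rev seen rest
    else pvLoopB rev (PySem.Set.add seen c) (rest ++ rev.getD c [])
termination_by ((((pvValsF rev ∪ pending.toFinset) \ seen.toFinset).card, pending.length) : Nat × Nat)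
decreasing_by
  · rw [Prod.lex_def]
    dsimp only
    have hsub : (pvValsF rev ∪ rest.toFinset) \ seen.toFinset
        ⊆ (pvValsF rev ∪ (c :: rest).toFinset) \ seen.toFinset := by
      intro x hx
      simp only [Finset.mem_sdiff, Finset.mem_union, List.mem_toFinset, List.mem_cons] at hx ⊢
      exact ⟨hx.1.imp id Or.inr, hx.2⟩
    rcases lt_or_eq_of_le (Finset.card_le_card hsub) with hlt | heq
    · left; exact hlt
    · right; exact ⟨heq, by simp⟩
  · rw [Prod.lex_def]
    dsimp only
    left
    rename_i hcn
    apply Finset.card_lt_card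
    have hsub : (pvValsF rev ∪ (rest ++ rev.getD c []).toFinset) \ (PySem.Set.add seen c).toFinset
        ⊆ (pvValsF rev ∪ (c :: rest).toFinset) \ seen.toFinset := by
      intro x hx
      simp only [Finset.mem_sdiff, Finset.mem_union, List.mem_toFinset, List.mem_cons,
        List.mem_append] at hx ⊢
      refine ⟨?_, fun hxs => hx.2 ?_⟩
      · rcases hx.1 with hk | hl | hg
        · exact Or.inl hk
        · exact Or.inr (Or.inr hl)
        · exact Or.inl (by simpa [pvValsF, List.mem_toFinset] using pvGetD_mem_vals rev c x hg)
      · rw [PySem.Set.mem_add]; left; exact hxs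
    refine (Finset.ssubset_iff_of_subset hsub).2 ⟨c, ?_, ?_⟩
    · simp only [Finset.mem_sdiff, Finset.mem_union, List.mem_toFinset, List.mem_cons]
      exact ⟨by simp, fun hmem => hcn ((pvContains_iff seen c).2 hmem)⟩
    · simp only [Finset.mem_sdiff, List.mem_toFinset, not_and, not_not]
      intro _
      rw [PySem.Set.mem_add]; right; rfl


def findAllNestedBagsContainingBag_alt (bagGraph : List (String × List String)) (bag : String) : List String :=
  let d := PySem.Dict.ofList bagGraph
  let rev := pvRev d
  pvLoopB rev PySem.Set.empty (rev.getD bag [])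

-- ===== PRECONDITION & SPEC =====
def Spec_findAllNestedBagsContainingBag (bagGraph : List (String × List String)) (bag : String) (out : List String) : Prop := out = findAllNestedBagsContainingBag_alt bagGraph bag
instance (bagGraph : List (String × List String)) (bag : String) (out : List String) : Decidable (Spec_findAllNestedBagsContainingBag bagGraph bag out) := by unfold Spec_findAllNestedBagsContainingBag; infer_instance

-- ===== CLAIM (what is proved, stated in full; the proofs are below) =====
def Claim_equal_findAllNestedBagsContainingBag : Prop := ∀ (bagGraph : List (String × List String)) (bag : String), Dom_findAllNestedBagsContainingBag bagGraph bag → Spec_findAllNestedBagsContainingBag bagGraph bag (findAllNestedBagsContainingBag bagGraph bag)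

-- ===== LEMMAS AND PROOFS =====

theorem pvRev_fold_getD (ps : List (String × List String)) (r0 : PySem.Dict String (List String)) (c : String) :
    (ps.foldl (fun rev p => (PySem.List.dedup p.2).foldl (fun r inner => r.modify inner [] (· ++ [p.1])) rev) r0).getD c []
      = r0.getD c [] ++ ((ps.filter (fun p => decide (c ∈ p.2))).map (·.1)) := by
  induction ps generalizing r0 with
  | nil => simp
  | cons p rest ih =>
    rw [List.foldl_cons, ih]
    have h1 : (PySem.List.dedup p.2).foldl (fun r inner => r.modify inner [] (· ++ [p.1])) r0
        = ((PySem.List.dedup p.2).map (fun k => (k, p.1))).foldl (fun r q => r.modify q.1 [] (· ++ [q.2])) r0 := by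
      rw [List.foldl_map]
    have hinner : ((PySem.List.dedup p.2).foldl (fun r inner => r.modify inner [] (· ++ [p.1])) r0).getD c []
        = r0.getD c [] ++ (if c ∈ p.2 then [p.1] else []) := by
      rw [h1, PySem.Dict.getD_foldl_modify_append]
      congr 1
      rw [List.filter_map, List.map_map]
      have hf : ((fun (q : String × String) => q.1 == c) ∘ fun k => (k, p.1)) = (fun k => k == c) := rfl
      rw [hf]
      by_cases hc : c ∈ p.2
      · have hmem : c ∈ PySem.List.dedup p.2 := (PySem.List.mem_dedup _ _).2 hc
        rw [List.filter_beq, List.count_eq_one_of_mem (PySem.List.nodup_dedup _) hmem]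
        simp [hc]
      · have hmem : c ∉ PySem.List.dedup p.2 := fun hm => hc ((PySem.List.mem_dedup _ _).1 hm)
        rw [List.filter_beq, List.count_eq_zero_of_not_mem hmem]
        simp [hc]
    rw [hinner]
    by_cases hc : c ∈ p.2
    · simp [hc]
    · simp [hc]

theorem pvRev_getD (d : PySem.Dict String (List String)) (hnd : d.keys.Nodup) (c : String) :
    (pvRev d).getD c [] = pvFindBags d c := by
  unfold pvRev
  rw [pvRev_fold_getD, pvFindBags_eq]
  simp only [PySem.Dict.getD_empty, List.nil_append]
  congr 1
  apply List.filter_congr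
  intro p hp
  have := PySem.Dict.getD_of_mem_items d (k := p.1) (v := p.2) (by simpa using hp) hnd []
  rw [this]

theorem pvQueue_lvl (rev : PySem.Dict String (List String)) (d : PySem.Dict String (List String))
    (hrev : ∀ c, rev.getD c [] = pvFindBags d c) (tc : List String) :
    ∀ (acc : List String) (seen : PySem.Set String),
      pvLoopB rev seen (tc ++ acc)
        = pvLoopB rev (tc.foldl (pvStepA d) (seen, [])).1 (acc ++ (tc.foldl (pvStepA d) (seen, [])).2) := by
  induction tc with
  | nil => intro acc seen; simp
  | cons c rest ih =>
    intro acc seen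
    by_cases h : PySem.Set.contains seen c = true
    · have h' : c ∈ seen := (pvContains_iff _ _).1 h
      have hstep : pvLoopB rev seen ((c :: rest) ++ acc) = pvLoopB rev seen (rest ++ acc) := by
        rw [pvLoopB.eq_def]; simp [h']
      rw [hstep, ih acc seen]
      simp only [List.foldl_cons, pvStepA, h, if_pos]
    · have h' : c ∉ seen := fun hm => h ((pvContains_iff _ _).2 hm)
      have hstep : pvLoopB rev seen ((c :: rest) ++ acc)
          = pvLoopB rev (PySem.Set.add seen c) ((rest ++ acc) ++ rev.getD c []) := by
        rw [pvLoopB.eq_def]; simp [h']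
      rw [hstep, List.append_assoc, ih (acc ++ rev.getD c []) (PySem.Set.add seen c)]
      simp only [List.foldl_cons, pvStepA, h, if_neg, Bool.false_eq_true, not_false_iff]
      rw [hrev c]
      rw [pvFoldA_seen d rest (PySem.Set.add seen c) [], pvFoldA_seen d rest (PySem.Set.add seen c) ([] ++ pvFindBags d c)]
      rw [pvFoldA_acc d rest (PySem.Set.add seen c) ([] ++ pvFindBags d c)]
      simp [List.append_assoc]

theorem pvLoopA_eq (d : PySem.Dict String (List String)) (hnd : d.keys.Nodup)
    (seen : PySem.Set String) (tc : List String) :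
    pvLoopA d seen tc = pvLoopB (pvRev d) seen tc := by
  induction seen, tc using pvLoopA.induct d with
  | case1 seen => rw [pvLoopA, pvLoopB.eq_def]; simp
  | case2 seen tc h r ih =>
    have hr : r = tc.foldl (pvStepA d) (seen, []) := by
      show List.foldl (fun s x => pvStepA d s x.1) (seen, []) tc.attach = _
      simp
    rw [pvLoopA, dif_neg h]
    rw [hr] at ih
    rw [ih]
    have := pvQueue_lvl (pvRev d) d (pvRev_getD d hnd) tc [] seen
    simp only [List.append_nil, List.nil_append] at this
    exact this.symm

-- ===== VERDICT (by name: the statement is the Claim_ definition above) =====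
theorem findAllNestedBagsContainingBag_spec : Claim_equal_findAllNestedBagsContainingBag := by
  intro bagGraph bag _
  unfold Spec_findAllNestedBagsContainingBag findAllNestedBagsContainingBag findAllNestedBagsContainingBag_alt
  have hnd := PySem.Dict.nodup_keys_ofList bagGraph
  show pvLoopA (PySem.Dict.ofList bagGraph) PySem.Set.empty (pvFindBags (PySem.Dict.ofList bagGraph) bag)
      = pvLoopB (pvRev (PySem.Dict.ofList bagGraph)) PySem.Set.empty ((pvRev (PySem.Dict.ofList bagGraph)).getD bag [])
  rw [pvRev_getD _ hnd, pvLoopA_eq _ hnd]
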